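-- pv_equiv track=rewrite | github.com/r-vishnusankar/Viser-AI | flask_server.py | _extract_sheet_id
-- ===== SOURCE A (Python) =====
-- def _extract_sheet_id(url_or_id):
--     """Extract spreadsheet ID from URL or return as-is if already an ID."""
--     s = (url_or_id or '').strip()
--     if not s:
--         return None
--     # URL format: https://docs.google.com/spreadsheets/d/SPREADSHEET_ID/edit...
--     if 'spreadsheets/d/' in s:
--         start = s.find('spreadsheets/d/') + len('spreadsheets/d/')
--         end = len(s)
--         for i in range(start, len(s)):
--             if s[i] in '/?':
--                 end = i
--                 break
--         return s[start:end].strip()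
--     # Assume it's already an ID (alphanumeric, dashes)
--     return s
-- ===== SOURCE B (Python) =====
-- import re
--
-- _SHEET_ID_RE = re.compile(r'spreadsheets/d/([^/?]*)')
--
-- def _extract_sheet_id(url_or_id):
--     """Extract spreadsheet ID from URL or return as-is if already an ID."""
--     s = (url_or_id or '').strip()
--     if not s:
--         return None
--     m = _SHEET_ID_RE.search(s)
--     if m is not None:
--         return m.group(1).strip()
--     return s
-- ===== Notes on version B (the rewrite author's own statement) =====
-- stated objective: idiomatic
-- what changed: Replaces the membership test + find + index-based character-scan break loop with a single precompiled regular expression whose one search both detects the URL marker and captures the ID up to the first delimiter.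
import Mathlib
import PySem

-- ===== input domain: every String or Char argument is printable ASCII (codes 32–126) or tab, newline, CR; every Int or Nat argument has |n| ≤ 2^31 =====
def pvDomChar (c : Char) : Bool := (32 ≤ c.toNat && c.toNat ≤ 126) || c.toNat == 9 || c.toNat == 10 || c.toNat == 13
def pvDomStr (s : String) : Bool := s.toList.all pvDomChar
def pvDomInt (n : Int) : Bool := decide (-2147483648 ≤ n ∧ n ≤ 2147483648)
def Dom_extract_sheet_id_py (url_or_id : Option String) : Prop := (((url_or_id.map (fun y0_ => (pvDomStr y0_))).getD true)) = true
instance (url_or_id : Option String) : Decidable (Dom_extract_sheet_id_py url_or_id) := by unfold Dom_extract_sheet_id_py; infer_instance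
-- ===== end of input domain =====

-- B replaces A's membership test + find + index-based character-scan break loop by a single
-- precompiled regular expression search that detects the URL marker and captures the ID up
-- to the first delimiter in one pass (idiomatic).


-- ===== PORT A =====
-- 'end = len(s); for i in range(start, len(s)):  if s[i] in "/?": end = i; break'
-- (s[i] is always in range here, so pyGetD's default is never used)
def pvALoop (cs : List Char) : List Int → Int → Int
  | [], e => e
  | i :: rest, e =>
      if PySem.Chars.isIn [PySem.List.pyGetD cs i ' '] ['/', '?'] then i
      else pvALoop cs rest e

def extract_sheet_id_py (url_or_id : Option String) : Option String :=
  -- s = (url_or_id or '').strip()   ('' stays '' through getD, so 'or' is exact here)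
  let s := PySem.Chars.strip (url_or_id.getD "").toList
  if s = [] then none
  else if PySem.Chars.isIn "spreadsheets/d/".toList s then
    let start := PySem.Chars.find s "spreadsheets/d/".toList + 15
    let e := pvALoop s (PySem.List.pyRange start (s.length : Int) 1) (s.length : Int)
    some (String.ofList (PySem.Chars.strip (PySem.Chars.slice s (some start) (some e))))
  else some (String.ofList s)

-- ===== PORT B =====
-- '[^/?]' of the regex
def pvKeep (c : Char) : Bool := c ≠ '/' && c ≠ '?'

-- _SHEET_ID_RE.search(s) for the regex 'spreadsheets/d/([^/?]*)': the leftmost match starts at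
-- the first occurrence of the literal marker, and group(1) is the greedy run of non-'/','?'
-- characters right after it. Ported by hand (no regex engine in Lean), exact for this pattern:
-- 'none' = no match, 'some g1' = the captured group.
def pvReSearchGroup1 (s : List Char) : Option (List Char) :=
  let i := PySem.Chars.find s "spreadsheets/d/".toList
  if i = -1 then none
  else some ((s.drop (i.toNat + 15)).takeWhile pvKeep)

def extract_sheet_id_py_alt (url_or_id : Option String) : Option String :=
  let s := PySem.Chars.strip (url_or_id.getD "").toList
  if s = [] then none
  else
    match pvReSearchGroup1 s with
    | some g1 => some (String.ofList (PySem.Chars.strip g1))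
    | none => some (String.ofList s)

-- ===== PRECONDITION & SPEC =====
def Spec_extract_sheet_id_py (url_or_id : Option String) (out : Option String) : Prop := out = extract_sheet_id_py_alt url_or_id
instance (url_or_id : Option String) (out : Option String) : Decidable (Spec_extract_sheet_id_py url_or_id out) := by unfold Spec_extract_sheet_id_py; infer_instance

-- ===== CLAIM (what is proved, stated in full; the proofs are below) =====
def Claim_equal_extract_sheet_id_py : Prop := ∀ (url_or_id : Option String), Dom_extract_sheet_id_py url_or_id → Spec_extract_sheet_id_py url_or_id (extract_sheet_id_py url_or_id)

-- ===== LEMMAS AND PROOFS =====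

-- isIn of a single char in a literal two-char string
theorem pv_singleton_infix {c : Char} {l : List Char} : [c] <:+: l ↔ c ∈ l := by
  constructor
  · intro h; exact h.mem (List.mem_singleton_self c)
  · intro h
    obtain ⟨l1, l2, rfl⟩ := List.append_of_mem h
    exact ⟨l1, l2, by simp⟩

theorem pv_isIn_delim (c : Char) :
    PySem.Chars.isIn [c] ['/', '?'] = !pvKeep c := by
  by_cases h1 : c = '/'
  · subst h1; decide
  · by_cases h2 : c = '?'
    · subst h2; decide
    · have : ¬ ([c] <:+: ['/', '?']) := by
        rw [pv_singleton_infix]; simp [h1, h2]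
      have := (PySem.Chars.find_eq_neg_one_iff ['/', '?'] [c]).mpr this
      simp [PySem.Chars.isIn, this, pvKeep, h1, h2]

-- A's loop computes n + length of the kept prefix of (drop n)
set_option maxRecDepth 4000 in
theorem pv_aLoop_eq (cs : List Char) (n : Nat) (hn : n ≤ cs.length) :
    pvALoop cs (PySem.List.pyRange (n : Int) (cs.length : Int) 1) (cs.length : Int)
      = (n : Int) + (((cs.drop n).takeWhile pvKeep).length : Int) := by
  induction hfuel : cs.length - n generalizing n with
  | zero =>
    have hne : n = cs.length := by omega
    subst hne
    rw [PySem.List.pyRange_one_eq_nil (le_refl _)]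
    simp [pvALoop]
  | succ k ih =>
    have hlt : n < cs.length := by omega
    rw [PySem.List.pyRange_one_cons (by exact_mod_cast hlt)]
    have hget : PySem.List.pyGetD cs (n : Int) ' ' = cs[n] := by
      rw [PySem.List.pyGetD, PySem.List.pyGet?_natCast, List.getElem?_eq_getElem hlt]
      rfl
    have hdrop : cs.drop n = cs[n] :: cs.drop (n+1) := List.drop_eq_getElem_cons hlt
    simp only [pvALoop, hget, pv_isIn_delim]
    cases hk : pvKeep cs[n] with
    | false =>
      simp only [Bool.not_false, if_true, hdrop, List.takeWhile_cons, hk, Bool.false_eq_true,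
        if_false, List.length_nil, Nat.cast_zero, add_zero]
    | true =>
      have hcast : (n : Int) + 1 = ((n + 1 : Nat) : Int) := by push_cast; ring
      rw [hcast, ih (n+1) (by omega) (by omega)]
      simp only [hdrop, List.takeWhile_cons, hk, Bool.not_true, if_true, List.length_cons,
        Bool.false_eq_true, if_false]
      push_cast; ring

-- ===== VERDICT (by name: the statement is the Claim_ definition above) =====
set_option maxHeartbeats 1000000 in
theorem extract_sheet_id_py_spec : Claim_equal_extract_sheet_id_py := by
  intro url _
  unfold Spec_extract_sheet_id_py extract_sheet_id_py extract_sheet_id_py_alt pvReSearchGroup1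
  set s := PySem.Chars.strip (url.getD "").toList with hs
  by_cases hnil : s = []
  · simp [hnil]
  · simp only [hnil, if_false]
    by_cases hf : PySem.Chars.find s "spreadsheets/d/".toList = -1
    · have hIn : PySem.Chars.isIn "spreadsheets/d/".toList s = false := by
        simp only [PySem.Chars.isIn, hf]
        decide
      simp only [hIn, Bool.false_eq_true, if_false, hf, if_true]
    · have hIn : PySem.Chars.isIn "spreadsheets/d/".toList s = true := by
        simp only [PySem.Chars.isIn, bne_iff_ne, ne_eq]
        exact hf
      simp only [hIn, if_true, hf, if_false]
      have h0 : 0 ≤ PySem.Chars.find s "spreadsheets/d/".toList := by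
        have := PySem.Chars.neg_one_le_find s "spreadsheets/d/".toList
        omega
      set f := PySem.Chars.find s "spreadsheets/d/".toList with hfdef
      obtain ⟨hp, -⟩ := PySem.Chars.find_spec h0
      have hlen15 : f.toNat + 15 ≤ s.length := by
        have hple := hp.length_le
        simp only [List.length_drop] at hple
        have h15 : ("spreadsheets/d/".toList : List Char).length = 15 := by decide
        rw [h15] at hple
        omega
      have hcast : f + 15 = ((f.toNat + 15 : Nat) : Int) := by omega
      rw [hcast, pv_aLoop_eq s (f.toNat + 15) hlen15,
        PySem.Chars.slice_eq_listSlice, PySem.List.slice_natCast_add]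
      refine congrArg (fun l => some (String.ofList (PySem.Chars.strip l))) ?_
      exact (List.prefix_iff_eq_take.mp (List.takeWhile_prefix pvKeep)).symm
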